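-- pv_equiv track=rewrite | github.com/wangduoyu414-cell/cangku | 02_agent_skill/agent/skill/current-file-dependency-analysis/scripts/build_slice.py | _collapse_context_edges
-- ===== SOURCE A (Python) =====
-- def _confidence_rank(value: str) -> int:
--     return {"high": 0, "medium": 1, "low": 2}.get(value, 3)
--
-- def _evidence_strength_rank(value: str) -> int:
--     return {"high": 0, "medium": 1, "low": 2}.get(value, 3)
--
-- def _context_priority(edge: dict) -> tuple:
--     match_reason = edge.get("match_reason", "")
--     return (
--         _confidence_rank(edge.get("confidence", "")),
--         _evidence_strength_rank(edge.get("evidence_strength", "")),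
--         0 if match_reason == "relative_path" else 1 if match_reason == "file_name" else 2,
--         edge.get("evidence_ref", ""),
--     )
--
-- def _collapse_context_edges(edges: list[dict]) -> list[dict]:
--     best_by_group: dict[tuple, dict] = {}
--     for edge in edges:
--         group_key = (
--             edge.get("from", ""),
--             edge.get("to", ""),
--             edge.get("direction", ""),
--             edge.get("edge_kind", ""),
--         )
--         current = best_by_group.get(group_key)
--         if current is None or _context_priority(edge) < _context_priority(current):
--             best_by_group[group_key] = edge
--     return sorted(best_by_group.values(), key=_context_priority)
-- ===== SOURCE B (Python) =====
-- _RANK_ORDER = ["high", "medium", "low"]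
-- _REASON_ORDER = ["relative_path", "file_name"]
--
--
-- def _collapse_context_edges(edges: list) -> list:
--     # Instead of folding a best-so-far dict, B lists the distinct group keys
--     # (first-appearance order), then for each key picks min over a scan of the
--     # whole input (min keeps the first on ties, like A's strict-< rule),
--     # then sorts.  Trades A's single fold for O(n * groups) rescans.
--     def rank(value):
--         return _RANK_ORDER.index(value) if value in _RANK_ORDER else 3
--
--     def priority(edge):
--         mr = edge.get("match_reason", "")
--         return (
--             rank(edge.get("confidence", "")),
--             rank(edge.get("evidence_strength", "")),
--             _REASON_ORDER.index(mr) if mr in _REASON_ORDER else 2,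
--             edge.get("evidence_ref", ""),
--         )
--
--     def key(edge):
--         return (
--             edge.get("from", ""),
--             edge.get("to", ""),
--             edge.get("direction", ""),
--             edge.get("edge_kind", ""),
--         )
--
--     keys = dict.fromkeys(map(key, edges))
--     representatives = [
--         min((e for e in edges if key(e) == k), key=priority) for k in keys
--     ]
--     return sorted(representatives, key=priority)
-- ===== Notes on version B (the rewrite author's own statement) =====
-- stated objective: alternative
-- what changed: A keeps a best-so-far edge per group in one dict fold; B instead first lists the distinct group keys (dict.fromkeys, first-appearance order) and then, for each key, selects its representative by a fresh min-scan over the whole input (min keeps the first on ties, reproducing A's strict-< keep-first rule), before the same final sort; B also computes the priority ranks by list.index over the rank order instead of a literal dict lookup.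
import Mathlib
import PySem

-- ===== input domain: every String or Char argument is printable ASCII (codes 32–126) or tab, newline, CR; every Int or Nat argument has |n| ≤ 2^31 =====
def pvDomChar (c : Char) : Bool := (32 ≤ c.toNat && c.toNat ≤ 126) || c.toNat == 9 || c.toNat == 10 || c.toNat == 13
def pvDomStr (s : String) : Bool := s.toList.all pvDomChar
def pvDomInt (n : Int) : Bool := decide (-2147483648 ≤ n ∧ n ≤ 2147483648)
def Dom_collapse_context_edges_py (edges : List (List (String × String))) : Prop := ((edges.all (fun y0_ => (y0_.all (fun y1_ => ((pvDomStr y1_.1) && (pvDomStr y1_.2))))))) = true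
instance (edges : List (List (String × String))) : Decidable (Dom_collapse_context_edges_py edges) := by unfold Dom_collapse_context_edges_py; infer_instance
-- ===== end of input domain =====

-- B replaces A's keep-best-so-far dict fold by: list the distinct group keys in first-appearance
-- order, then pick each group's representative with a min-scan over the input (first-min = A's
-- strict-< keep-first rule), then sort; same result by a different decomposition (objective: alternative).


-- ===== PORT A =====
-- edge.get(k, "") — first-match lookup on the association list, exact for Python dicts (unique keys)
def edgeGet (e : List (String × String)) (k : String) : String := (PySem.Dict.mk e).getD k ""

-- {"high":0,"medium":1,"low":2}.get(v, 3), encoded as the digit character '0'..'3' (same order as the ints)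
def rankCh (v : String) : Char :=
  if v = "high" then '0' else if v = "medium" then '1' else if v = "low" then '2' else '3'

-- 0 if mr == "relative_path" else 1 if mr == "file_name" else 2, as the digit character
def reasonCh (v : String) : Char :=
  if v = "relative_path" then '0' else if v = "file_name" then '1' else '2'

-- _context_priority: Python's 4-tuple (int, int, int, str) is encoded as one String —
-- three single digit characters followed by evidence_ref. Exact order-embedding: each of the
-- first three components is a single char ('0'..'3' in the ints' order), so String's
-- code-point-lexicographic < coincides with Python's tuple <.
def contextPriority (e : List (String × String)) : String :=
  String.ofList (rankCh (edgeGet e "confidence") ::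
             rankCh (edgeGet e "evidence_strength") ::
             reasonCh (edgeGet e "match_reason") ::
             (edgeGet e "evidence_ref").toList)

-- the group key (from, to, direction, edge_kind)
def groupKey (e : List (String × String)) : String × String × String × String :=
  (edgeGet e "from", edgeGet e "to", edgeGet e "direction", edgeGet e "edge_kind")

def collapse_context_edges_py (edges : List (List (String × String))) : List (List (String × String)) :=
  let best_by_group :=
    edges.foldl (fun d edge =>
      match d.get? (groupKey edge) with
      | none => d.insert (groupKey edge) edge
      | some current =>
          if contextPriority edge < contextPriority current then d.insert (groupKey edge) edge else d)
      PySem.Dict.empty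
  PySem.List.sorted best_by_group.values contextPriority

-- ===== PORT B =====
-- Source B's edge.get(k, ""): first pair whose key matches, written directly with find?
def bGet (e : List (String × String)) (k : String) : String :=
  ((e.find? (fun p => p.1 == k)).map (fun p => p.2)).getD ""

-- _RANK_ORDER.index(value) if value in _RANK_ORDER else 3 (Nat rank, then its digit char)
def bRank (v : String) : Nat :=
  (PySem.List.index? ["high", "medium", "low"] v).getD 3

-- _REASON_ORDER.index(mr) if mr in _REASON_ORDER else 2
def bReason (v : String) : Nat :=
  (PySem.List.index? ["relative_path", "file_name"] v).getD 2

def bDigit (n : Nat) : Char := Char.ofNat (48 + n)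

-- Source B's priority tuple, encoded as one String exactly like A's (order-embedding of the tuple)
def bPriority (e : List (String × String)) : String :=
  String.ofList (bDigit (bRank (bGet e "confidence")) ::
             bDigit (bRank (bGet e "evidence_strength")) ::
             bDigit (bReason (bGet e "match_reason")) ::
             (bGet e "evidence_ref").toList)

def bKey (e : List (String × String)) : String × String × String × String :=
  (bGet e "from", bGet e "to", bGet e "direction", bGet e "edge_kind")

def collapse_context_edges_py_alt (edges : List (List (String × String))) : List (List (String × String)) :=
  -- keys = dict.fromkeys(map(key, edges)); reps = [min((e for e in edges if key(e)==k), key=priority) for k in keys]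
  -- (each key comes from some edge, so the filtered list is never empty and min never raises; [] stands for that dead branch)
  let keys := PySem.List.dedup (edges.map bKey)
  let representatives :=
    keys.map (fun k =>
      (PySem.List.min? (edges.filter (fun e => bKey e == k)) bPriority).getD [])
  PySem.List.sorted representatives bPriority

-- ===== PRECONDITION & SPEC =====
def Spec_collapse_context_edges_py (edges : List (List (String × String))) (out : List (List (String × String))) : Prop := out = collapse_context_edges_py_alt edges
instance (edges : List (List (String × String))) (out : List (List (String × String))) : Decidable (Spec_collapse_context_edges_py edges out) := by unfold Spec_collapse_context_edges_py; infer_instance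

-- ===== CLAIM (what is proved, stated in full; the proofs are below) =====
def Claim_equal_collapse_context_edges_py : Prop := ∀ (edges : List (List (String × String))), Dom_collapse_context_edges_py edges → Spec_collapse_context_edges_py edges (collapse_context_edges_py edges)

-- ===== LEMMAS AND PROOFS =====
lemma bGet_eq (e : List (String × String)) (k : String) : bGet e k = edgeGet e k := by
  simp [bGet, edgeGet, PySem.Dict.getD, PySem.Dict.get?]

lemma bPriority_eq (e : List (String × String)) : bPriority e = contextPriority e := by
  unfold bPriority contextPriority
  rw [bGet_eq, bGet_eq, bGet_eq, bGet_eq]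
  have hr : ∀ v : String, bDigit (bRank v) = rankCh v := by
    intro v
    by_cases h1 : v = "high"
    · subst h1; rfl
    by_cases h2 : v = "medium"
    · subst h2; rfl
    by_cases h3 : v = "low"
    · subst h3; rfl
    have e1 : ("high" == v) = false := beq_eq_false_iff_ne.mpr (Ne.symm h1)
    have e2 : ("medium" == v) = false := beq_eq_false_iff_ne.mpr (Ne.symm h2)
    have e3 : ("low" == v) = false := beq_eq_false_iff_ne.mpr (Ne.symm h3)
    unfold bDigit bRank rankCh PySem.List.index?
    simp only [List.idxOf?, List.findIdx?_cons, e1, e2, e3, Bool.false_eq_true,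
      List.findIdx?_nil, Option.map_none, Option.getD_none, if_false, h1, h2, h3]
  have hs : ∀ v : String, bDigit (bReason v) = reasonCh v := by
    intro v
    by_cases h1 : v = "relative_path"
    · subst h1; rfl
    by_cases h2 : v = "file_name"
    · subst h2; rfl
    have e1 : ("relative_path" == v) = false := beq_eq_false_iff_ne.mpr (Ne.symm h1)
    have e2 : ("file_name" == v) = false := beq_eq_false_iff_ne.mpr (Ne.symm h2)
    unfold bDigit bReason reasonCh PySem.List.index?
    simp only [List.idxOf?, List.findIdx?_cons, e1, e2, Bool.false_eq_true,
      List.findIdx?_nil, Option.map_none, Option.getD_none, if_false, h1, h2]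
  rw [hr, hr, hs]

lemma bKey_eq (e : List (String × String)) : bKey e = groupKey e := by
  unfold bKey groupKey; rw [bGet_eq, bGet_eq, bGet_eq, bGet_eq]

-- first-min of g ++ [e] given first-min of g
lemma min?_append_some (g : List (List (String × String))) (e m : List (String × String))
    (h : PySem.List.min? g contextPriority = some m) :
    PySem.List.min? (g ++ [e]) contextPriority =
      if contextPriority e < contextPriority m then some e else some m := by
  unfold PySem.List.min? at h ⊢
  rw [List.foldl_append, h]
  rfl

-- A's loop body
def stepA (d : PySem.Dict (String × String × String × String) (List (String × String)))
    (edge : List (String × String)) :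
    PySem.Dict (String × String × String × String) (List (String × String)) :=
  match d.get? (groupKey edge) with
  | none => d.insert (groupKey edge) edge
  | some current =>
      if contextPriority edge < contextPriority current then d.insert (groupKey edge) edge else d

-- the representative B computes for key k over the edge list l
def bestD (l : List (List (String × String))) (k : String × String × String × String) :
    List (String × String) :=
  (PySem.List.min? (l.filter (fun e => groupKey e == k)) contextPriority).getD []

-- invariant of A's fold: its keys are the distinct group keys in order, and each key holds
-- exactly B's representative over the prefix
lemma foldA_spec (pre : List (List (String × String))) :
    (pre.foldl stepA PySem.Dict.empty).keys = PySem.Set.ofList (pre.map groupKey) ∧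
    ∀ k, (pre.foldl stepA PySem.Dict.empty).getD k [] = bestD pre k := by
  induction pre using List.reverseRecOn with
  | nil =>
    exact ⟨rfl, fun k => rfl⟩
  | append_singleton pre e ih =>
    obtain ⟨ihk, ihv⟩ := ih
    rw [List.foldl_append, List.map_append]
    simp only [List.foldl_cons, List.foldl_nil, List.map_cons, List.map_nil]
    set d := pre.foldl stepA PySem.Dict.empty with hd
    have hmemiff : d.contains (groupKey e) = true ↔ groupKey e ∈ pre.map groupKey := by
      rw [PySem.Dict.contains_iff_mem_keys, ihk, PySem.Set.mem_ofList]
    constructor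
    · -- keys
      rw [PySem.Set.ofList_append_singleton, ← ihk]
      cases hg : d.get? (groupKey e) with
      | none =>
        have hc : d.contains (groupKey e) = false := (PySem.Dict.get?_eq_none_iff_contains d _).mp hg
        simp only [stepA, hg]
        rw [PySem.Dict.keys_insert_of_not_contains d e hc,
            PySem.Set.add_of_not_mem (by rw [← PySem.Dict.contains_iff_mem_keys]; simp [hc])]
      | some cur =>
        have hc : d.contains (groupKey e) = true := by
          rw [PySem.Dict.contains_eq_isSome_get?, hg]; rfl
        have hmem : groupKey e ∈ d.keys := (PySem.Dict.contains_iff_mem_keys d _).mp hc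
        simp only [stepA, hg]
        rw [PySem.Set.add_of_mem hmem]
        split
        · exact PySem.Dict.keys_insert_of_contains d e hc
        · rfl
    · -- values
      intro k
      have hfilt : (pre ++ [e]).filter (fun x => groupKey x == k) =
          pre.filter (fun x => groupKey x == k) ++ (if (groupKey e == k) = true then [e] else []) := by
        rw [List.filter_append]
        simp only [List.filter_cons, List.filter_nil]
      by_cases hk : k = groupKey e
      · subst hk
        have hfe : (pre ++ [e]).filter (fun x => groupKey x == groupKey e) =
            pre.filter (fun x => groupKey x == groupKey e) ++ [e] := by
          rw [hfilt, if_pos (by simp)]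
        cases hg : d.get? (groupKey e) with
        | none =>
          have hc : d.contains (groupKey e) = false := (PySem.Dict.get?_eq_none_iff_contains d _).mp hg
          have hnotmem : groupKey e ∉ pre.map groupKey := by
            intro h; rw [← hmemiff] at h; simp [hc] at h
          have hfp : pre.filter (fun x => groupKey x == groupKey e) = [] := by
            rw [List.filter_eq_nil_iff]
            intro a ha hcontra
            exact hnotmem (List.mem_map.mpr ⟨a, ha, by simpa using hcontra⟩)
          simp only [stepA, hg]
          rw [PySem.Dict.getD_insert_self]
          unfold bestD
          rw [hfe, hfp]
          rfl
        | some cur =>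
          have hc : d.contains (groupKey e) = true := by
            rw [PySem.Dict.contains_eq_isSome_get?, hg]; rfl
          have hmemp : groupKey e ∈ pre.map groupKey := hmemiff.mp hc
          have hfp : pre.filter (fun x => groupKey x == groupKey e) ≠ [] := by
            intro hnil
            obtain ⟨a, ha, hak⟩ := List.mem_map.mp hmemp
            have : a ∈ pre.filter (fun x => groupKey x == groupKey e) :=
              List.mem_filter.mpr ⟨ha, by simp [hak]⟩
            simp [hnil] at this
          obtain ⟨m, hm⟩ : ∃ m, PySem.List.min? (pre.filter (fun x => groupKey x == groupKey e)) contextPriority = some m := by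
            cases hx : PySem.List.min? (pre.filter (fun x => groupKey x == groupKey e)) contextPriority with
            | none => exact absurd ((PySem.List.min?_eq_none_iff _ contextPriority).mp hx) hfp
            | some m => exact ⟨m, rfl⟩
          have hcur : cur = m := by
            have h2 := ihv (groupKey e)
            rw [PySem.Dict.getD_eq_get?_getD, hg] at h2
            unfold bestD at h2
            rw [hm] at h2
            simpa using h2
          simp only [stepA, hg]
          unfold bestD
          rw [hcur, hfe, min?_append_some _ e m hm]
          split
          · rw [PySem.Dict.getD_insert_self]; simp
          · rw [PySem.Dict.getD_eq_get?_getD, hg]; simpa using hcur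
      · -- untouched key
        have hne : groupKey e ≠ k := fun h => hk h.symm
        have hfk : (pre ++ [e]).filter (fun x => groupKey x == k) =
            pre.filter (fun x => groupKey x == k) := by
          rw [hfilt, if_neg (by simp [beq_eq_false_iff_ne.mpr hne]), List.append_nil]
        have hstep : (stepA d e).getD k [] = d.getD k [] := by
          cases hg : d.get? (groupKey e) with
          | none =>
            simp only [stepA, hg]
            exact PySem.Dict.getD_insert_of_ne d e [] hk
          | some cur =>
            simp only [stepA, hg]
            split
            · exact PySem.Dict.getD_insert_of_ne d e [] hk
            · rfl
        rw [hstep, ihv k]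
        unfold bestD
        rw [hfk]

-- ===== VERDICT (by name: the statement is the Claim_ definition above) =====
theorem collapse_context_edges_py_spec : Claim_equal_collapse_context_edges_py := by
  intro edges _
  unfold Spec_collapse_context_edges_py collapse_context_edges_py collapse_context_edges_py_alt
  obtain ⟨hk, hv⟩ := foldA_spec edges
  have hBP : bPriority = contextPriority := funext bPriority_eq
  have hBK : bKey = groupKey := funext bKey_eq
  rw [hBP, hBK]
  show PySem.List.sorted (List.foldl stepA PySem.Dict.empty edges).values contextPriority =
    PySem.List.sorted ((PySem.List.dedup (edges.map groupKey)).map (fun k =>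
      (PySem.List.min? (edges.filter (fun e => groupKey e == k)) contextPriority).getD [])) contextPriority
  have hnd : (edges.foldl stepA PySem.Dict.empty).keys.Nodup := by
    rw [hk]; exact PySem.Set.nodup_ofList _
  rw [PySem.Dict.values_eq_map_keys _ hnd ([] : List (String × String)), hk,
      PySem.List.dedup_eq_ofList]
  congr 1
  apply List.map_congr_left
  intro k _
  rw [hv k]
  rfl
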